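-- pv_equiv track=rewrite | github.com/Crystalwarrior/KFO-Server | tests/test_gag.py | _is_gagged_message
-- ===== SOURCE A (Python) =====
-- def _is_gagged_message(msg):
--     if not 5+1 <= len(msg) <= 9+1:
--         return False
--     if not msg.startswith(('G', 'M')):
--         return False
--     non_letters = [x for x in msg[1:] if x not in ['g', 'h', 'r', 'm']]
--     if non_letters:
--         return False
--     return True
-- ===== SOURCE B (Python) =====
-- import re
--
-- _GAG_RE = re.compile(r'[GM][ghrm]{5,9}')
--
-- def _is_gagged_message(msg):
--     return _GAG_RE.fullmatch(msg) is not None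
-- ===== Notes on version B (the rewrite author's own statement) =====
-- stated objective: idiomatic
-- what changed: Replaces the explicit length guard, startswith check and per-character list comprehension with a single precompiled regular expression fullmatch of [GM][ghrm]{5,9}.
import Mathlib
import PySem

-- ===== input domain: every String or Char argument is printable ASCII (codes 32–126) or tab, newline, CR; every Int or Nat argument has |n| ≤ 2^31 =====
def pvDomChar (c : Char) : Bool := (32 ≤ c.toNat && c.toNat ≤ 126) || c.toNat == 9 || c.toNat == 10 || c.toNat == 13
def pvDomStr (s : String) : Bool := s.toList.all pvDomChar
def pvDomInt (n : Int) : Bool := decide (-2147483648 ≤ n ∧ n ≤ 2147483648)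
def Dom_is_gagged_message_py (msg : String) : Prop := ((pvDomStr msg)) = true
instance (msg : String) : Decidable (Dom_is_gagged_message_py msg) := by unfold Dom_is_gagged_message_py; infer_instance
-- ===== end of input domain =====

-- B replaces A's explicit length/startswith/comprehension checks by a single regex fullmatch
-- of [GM][ghrm]{5,9} (idiomatic; same cost).


-- ===== PORT A =====
def is_gagged_message_py (msg : String) : Bool :=
  -- if not 5+1 <= len(msg) <= 9+1: return False
  if !(decide (5 + 1 ≤ PySem.Str.len msg) && decide (PySem.Str.len msg ≤ 9 + 1)) then false
  -- if not msg.startswith(('G', 'M')): return False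
  else if !(PySem.Str.startswith msg "G" || PySem.Str.startswith msg "M") then false
  else
    -- non_letters = [x for x in msg[1:] if x not in ['g','h','r','m']]
    let non_letters :=
      (PySem.List.slice msg.toList (some 1) none).filter
        (fun x => !(['g', 'h', 'r', 'm'].contains x))
    -- if non_letters: return False / return True
    if !non_letters.isEmpty then false else true

-- ===== PORT B =====
-- hand port of re.fullmatch(r'[GM][ghrm]{5,9}', msg): character classes and an anchored
-- counted repetition consumed left to right; exact for this pattern (no backtracking needed).
def gagFirstClass (c : Char) : Bool := c == 'G' || c == 'M'
def gagRestClass (c : Char) : Bool := c == 'g' || c == 'h' || c == 'r' || c == 'm'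
-- matches [ghrm]{5,9} against the whole of cs, having already consumed n repetitions
def gagRep : List Char → Nat → Bool
  | [], n => decide (5 ≤ n) && decide (n ≤ 9)
  | c :: cs, n => decide (n < 9) && gagRestClass c && gagRep cs (n + 1)
def is_gagged_message_py_alt (msg : String) : Bool :=
  match msg.toList with
  | [] => false
  | c :: cs => gagFirstClass c && gagRep cs 0

-- ===== PRECONDITION & SPEC =====
def Spec_is_gagged_message_py (msg : String) (out : Bool) : Prop := out = is_gagged_message_py_alt msg
instance (msg : String) (out : Bool) : Decidable (Spec_is_gagged_message_py msg out) := by unfold Spec_is_gagged_message_py; infer_instance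

-- ===== CLAIM (what is proved, stated in full; the proofs are below) =====
def Claim_equal_is_gagged_message_py : Prop := ∀ (msg : String), Dom_is_gagged_message_py msg → Spec_is_gagged_message_py msg (is_gagged_message_py msg)

-- ===== LEMMAS AND PROOFS =====

theorem gagRep_eq (cs : List Char) (n : Nat) :
    gagRep cs n = (decide (5 ≤ n + cs.length) && decide (n + cs.length ≤ 9) && cs.all gagRestClass) := by
  induction cs generalizing n with
  | nil => simp [gagRep]
  | cons c cs ih =>
    simp only [gagRep, ih (n + 1), List.all_cons, List.length_cons]
    by_cases h1 : gagRestClass c = true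
    · by_cases h2 : n + (cs.length + 1) ≤ 9
      · have e1 : n < 9 := by omega
        have e2 : n + 1 + cs.length ≤ 9 := by omega
        have e3 : (5 ≤ n + 1 + cs.length) ↔ (5 ≤ n + (cs.length + 1)) := by omega
        simp only [h1, e1, e2, h2, e3, decide_true, Bool.true_and, Bool.and_true]
        rfl
      · have e2 : ¬ (n + 1 + cs.length ≤ 9) := by omega
        simp [h1, h2, e2]
    · simp [Bool.eq_false_iff.mpr h1]

theorem gagRestClass_contains (c : Char) :
    (['g', 'h', 'r', 'm'].contains c) = gagRestClass c := by
  simp only [gagRestClass, List.contains_cons, List.contains_nil, Bool.or_false, Bool.or_assoc]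

theorem gagStarts (c : Char) (cs : List Char) :
    PySem.Chars.startswith (c :: cs) [c] = true := by
  rw [PySem.Chars.startswith_iff]
  exact List.cons_prefix_cons.mpr ⟨rfl, List.nil_prefix⟩

theorem gagStartsNe (c d : Char) (cs : List Char) (h : c ≠ d) :
    PySem.Chars.startswith (c :: cs) [d] = false := by
  rw [Bool.eq_false_iff]
  intro hco
  rw [PySem.Chars.startswith_iff] at hco
  exact h (List.cons_prefix_cons.mp hco).1.symm

theorem gagFilter (cs : List Char) :
    (cs.filter (fun x => !(['g', 'h', 'r', 'm'].contains x))).isEmpty = cs.all gagRestClass := by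
  have hf : (fun x => !(['g', 'h', 'r', 'm'].contains x)) = (fun x => !(gagRestClass x)) :=
    funext fun x => by rw [gagRestClass_contains]
  rw [hf]
  induction cs with
  | nil => rfl
  | cons c cs ih =>
    cases h : gagRestClass c <;> simp [List.all_cons, h, ih]

theorem is_gagged_message_py_spec : Claim_equal_is_gagged_message_py := by
  intro msg _
  show is_gagged_message_py msg = is_gagged_message_py_alt msg
  unfold is_gagged_message_py is_gagged_message_py_alt
  cases hms : msg.toList with
  | nil => simp [PySem.Str.len, hms]
  | cons c cs =>
    have hG' : "G".toList = ['G'] := rfl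
    have hM' : "M".toList = ['M'] := rfl
    simp only [PySem.Str.len, PySem.Str.startswith_eq, hms, hG', hM',
      PySem.List.slice_from_one, List.tail_cons, gagRep_eq, gagFilter,
      List.length_cons, gagFirstClass]
    by_cases hlen : 5 ≤ cs.length ∧ cs.length ≤ 9
    · have e1 : (5 + 1 : Int) ≤ ((cs.length + 1 : Nat) : Int) := by push_cast; omega
      have e2 : ((cs.length + 1 : Nat) : Int) ≤ 9 + 1 := by push_cast; omega
      have e3 : 5 ≤ 0 + cs.length := by omega
      have e4 : 0 + cs.length ≤ 9 := by omega
      simp only [e1, e2, e3, e4, decide_true, Bool.true_and, Bool.and_true, Bool.not_true,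
        Bool.false_eq_true, if_false]
      by_cases hG : c = 'G'
      · subst hG
        cases hall : cs.all gagRestClass <;> simp [gagStarts]
      · by_cases hM : c = 'M'
        · subst hM
          cases hall : cs.all gagRestClass <;>
            simp [gagStarts, gagStartsNe 'M' 'G' cs (by decide)]
        · simp [gagStartsNe c 'G' cs hG, gagStartsNe c 'M' cs hM, hG, hM]
    · rcases Decidable.not_and_iff_not_or_not.mp hlen with h | h
      · have e1 : ((cs.length : Int) + 1 < 6) := by omega
        simp [e1, h]
      · have e2 : (10 ≤ cs.length) := by omega
        simp [e2, h]
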